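-- pv_equiv track=rewrite | github.com/Komatsunabok/kd-cka | zzz/convert_structure.py | txt_to_markdown_tables
-- ===== SOURCE A (Python) =====
-- def txt_to_markdown_tables(txt_lines):
--     tables = []
--     current_model = None
--     current_lines = []
--     for line in txt_lines:
--         stripped = line.strip()
--         if not stripped:
--             continue
--         # コロンが含まれていない行をモデル名とみなす
--         if ':' not in stripped:
--             if current_model and current_lines:
--                 tables.append((current_model, current_lines))
--             current_model = stripped
--             current_lines = []
--         else:
--             current_lines.append(stripped)
--     # 最後のモデルも追加
--     if current_model and current_lines:
--         tables.append((current_model, current_lines))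
--     return tables
-- ===== SOURCE B (Python) =====
-- def txt_to_markdown_tables(txt_lines):
--     # Different decomposition: pre-clean once, then scan the cleaned list
--     # span by span: skip colon lines, take a header, take its colon-line block.
--     cleaned = [s for s in (l.strip() for l in txt_lines) if s]
--     tables = []
--     n = len(cleaned)
--     i = 0
--     while i < n:
--         if ':' in cleaned[i]:
--             i += 1          # colon lines before any header carry no model name
--             continue
--         header = cleaned[i]
--         j = i + 1
--         while j < n and ':' in cleaned[j]:
--             j += 1
--         block = cleaned[i + 1:j]
--         if block:
--             tables.append((header, block))
--         i = j
--     return tables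
-- ===== Notes on version B (the rewrite author's own statement) =====
-- stated objective: alternative
-- what changed: A threads (current_model, current_lines) accumulator state through one loop with a final flush; B first builds the cleaned line list and then splits it span by span into header + block-of-colon-lines segments (skip/take spans), with no threaded model/lines state and no trailing flush.
import Mathlib
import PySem

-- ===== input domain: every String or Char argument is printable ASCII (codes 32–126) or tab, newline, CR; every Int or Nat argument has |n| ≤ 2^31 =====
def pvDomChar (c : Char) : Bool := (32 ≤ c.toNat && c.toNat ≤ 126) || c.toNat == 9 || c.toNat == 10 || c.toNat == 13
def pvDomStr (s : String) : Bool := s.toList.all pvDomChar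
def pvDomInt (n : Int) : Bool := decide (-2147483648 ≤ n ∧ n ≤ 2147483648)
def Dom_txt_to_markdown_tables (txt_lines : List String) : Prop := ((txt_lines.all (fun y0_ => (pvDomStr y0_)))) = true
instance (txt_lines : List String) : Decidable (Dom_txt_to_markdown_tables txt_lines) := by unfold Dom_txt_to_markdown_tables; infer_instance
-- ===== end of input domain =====

-- B replaces A's threaded (current_model, current_lines) accumulator loop with a
-- pre-cleaning pass plus a recursive header/span split of the cleaned lines (alternative decomposition; no speed claim).

-- ===== PORT A =====
-- A's repeated 'if current_model and current_lines: tables.append((current_model, current_lines))'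
def pvFlushA (st : List (String × List String) × Option String × List String) :
    List (String × List String) :=
  match st.2.1 with
  | some m => if m ≠ "" ∧ st.2.2 ≠ [] then st.1 ++ [(m, st.2.2)] else st.1
  | none => st.1

-- the loop body of A
def pvStepA (st : List (String × List String) × Option String × List String) (line : String) :
    List (String × List String) × Option String × List String :=
  let stripped := PySem.Str.strip line
  if stripped = "" then st
  else if PySem.Str.isIn ":" stripped = false then
    (pvFlushA st, some stripped, ([] : List String))
  else (st.1, st.2.1, st.2.2 ++ [stripped])

def txt_to_markdown_tables (txt_lines : List String) : List (String × List String) :=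
  pvFlushA (txt_lines.foldl pvStepA ([], none, []))

-- ===== PORT B =====
def pvHasColon (s : String) : Bool := PySem.Str.isIn ":" s

-- Source B's recursive 'parse': skip leading colon lines, take the colon span after a header, recurse
def pvParse : List String → List (String × List String)
  | [] => []
  | l :: ls =>
    if pvHasColon l then pvParse ls
    else
      let block := ls.takeWhile pvHasColon
      let rest := pvParse (ls.dropWhile pvHasColon)
      if block ≠ [] then (l, block) :: rest else rest
termination_by ls => ls.length
decreasing_by
  · simp
  · have := List.length_dropWhile_le pvHasColon ls; simp; omega

def txt_to_markdown_tables_alt (txt_lines : List String) : List (String × List String) :=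
  pvParse ((txt_lines.map PySem.Str.strip).filter (fun s => s ≠ ""))

-- ===== PRECONDITION & SPEC =====
def Spec_txt_to_markdown_tables (txt_lines : List String) (out : List (String × List String)) : Prop := out = txt_to_markdown_tables_alt txt_lines
instance (txt_lines : List String) (out : List (String × List String)) : Decidable (Spec_txt_to_markdown_tables txt_lines out) := by unfold Spec_txt_to_markdown_tables; infer_instance

-- ===== CLAIM (what is proved, stated in full; the proofs are below) =====
def Claim_equal_txt_to_markdown_tables : Prop := ∀ (txt_lines : List String), Dom_txt_to_markdown_tables txt_lines → Spec_txt_to_markdown_tables txt_lines (txt_to_markdown_tables txt_lines)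

-- ===== LEMMAS AND PROOFS =====

-- A's step on an already-stripped non-empty line
def pvStepS (st : List (String × List String) × Option String × List String) (s : String) :
    List (String × List String) × Option String × List String :=
  if PySem.Str.isIn ":" s = false then (pvFlushA st, some s, ([] : List String))
  else (st.1, st.2.1, st.2.2 ++ [s])

lemma pvStepA_eq (st : List (String × List String) × Option String × List String)
    (line : String) :
    pvStepA st line =
      if PySem.Str.strip line = "" then st else pvStepS st (PySem.Str.strip line) := by
  simp [pvStepA, pvStepS]

lemma foldA_eq_foldS (txt : List String)
    (st : List (String × List String) × Option String × List String) :
    txt.foldl pvStepA st =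
      ((txt.map PySem.Str.strip).filter (fun s => s ≠ "")).foldl pvStepS st := by
  induction txt generalizing st with
  | nil => rfl
  | cons l t ih =>
    by_cases h : PySem.Str.strip l = "" <;>
      simp [List.foldl_cons, pvStepA_eq, h, ih]

lemma pvParse_cons_colon (l : String) (ls : List String) (hc : pvHasColon l = true) :
    pvParse (l :: ls) = pvParse ls := by
  rw [pvParse.eq_def]; simp [hc]

lemma pvParse_cons_header (l : String) (ls : List String) (hc : pvHasColon l = false) :
    pvParse (l :: ls) =
      (if ls.takeWhile pvHasColon = [] then [] else [(l, ls.takeWhile pvHasColon)])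
        ++ pvParse (ls.dropWhile pvHasColon) := by
  rw [pvParse.eq_def]
  simp only [hc, Bool.false_eq_true, if_false]
  by_cases hb : ls.takeWhile pvHasColon = [] <;> simp [hb]

lemma foldS_some (ls : List String) (T : List (String × List String)) (m : String)
    (cur : List String) (hm : m ≠ "") (hls : ∀ s ∈ ls, s ≠ "") :
    pvFlushA (ls.foldl pvStepS (T, some m, cur)) =
      T ++ (if cur ++ ls.takeWhile pvHasColon = [] then []
              else [(m, cur ++ ls.takeWhile pvHasColon)])
        ++ pvParse (ls.dropWhile pvHasColon) := by
  induction ls generalizing T m cur with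
  | nil =>
    simp only [List.foldl_nil, pvFlushA, pvParse, List.takeWhile_nil, List.dropWhile_nil,
      List.append_nil, ne_eq, hm, not_false_iff, true_and]
    split_ifs <;> simp_all
  | cons l t ih =>
    have hl : l ≠ "" := hls l (by simp)
    have ht : ∀ s ∈ t, s ≠ "" := fun s hs => hls s (by simp [hs])
    by_cases hc : pvHasColon l
    · have hcol : PySem.Str.isIn ":" l = true := hc
      rw [List.foldl_cons]
      simp only [pvStepS, hcol, Bool.true_eq_false, if_false]
      rw [ih T m (cur ++ [l]) hm ht, List.takeWhile_cons_of_pos hc,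
        List.dropWhile_cons_of_pos hc]
      simp
    · have hcol : PySem.Str.isIn ":" l = false := by simpa using hc
      have hcb : pvHasColon l = false := by simpa using hc
      rw [List.foldl_cons]
      simp only [pvStepS, hcol]
      rw [if_pos trivial]
      rw [ih (pvFlushA (T, some m, cur)) l [] hl ht,
        List.takeWhile_cons_of_neg (by simp [hcb]),
        List.dropWhile_cons_of_neg (by simp [hcb]),
        pvParse_cons_header l t hcb]
      simp only [pvFlushA, ne_eq, hm, not_false_iff, true_and, List.nil_append]
      split_ifs <;> simp_all

lemma foldS_none (ls : List String) (T : List (String × List String))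
    (cur : List String) (hls : ∀ s ∈ ls, s ≠ "") :
    pvFlushA (ls.foldl pvStepS (T, none, cur)) = T ++ pvParse ls := by
  induction ls generalizing cur with
  | nil => simp [pvFlushA, pvParse]
  | cons l t ih =>
    have hl : l ≠ "" := hls l (by simp)
    have ht : ∀ s ∈ t, s ≠ "" := fun s hs => hls s (by simp [hs])
    by_cases hc : pvHasColon l
    · have hcol : PySem.Str.isIn ":" l = true := hc
      rw [List.foldl_cons]
      simp only [pvStepS, hcol, Bool.true_eq_false, if_false]
      rw [ih (cur ++ [l]) ht, pvParse_cons_colon l t hc]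
    · have hcol : PySem.Str.isIn ":" l = false := by simpa using hc
      have hcb : pvHasColon l = false := by simpa using hc
      rw [List.foldl_cons]
      simp only [pvStepS, hcol]
      rw [if_pos trivial]
      rw [foldS_some t (pvFlushA (T, none, cur)) l [] hl ht,
        pvParse_cons_header l t hcb]
      simp [pvFlushA]

-- ===== VERDICT (by name: the statement is the Claim_ definition above) =====
theorem txt_to_markdown_tables_spec : Claim_equal_txt_to_markdown_tables := by
  intro txt _
  unfold Spec_txt_to_markdown_tables txt_to_markdown_tables txt_to_markdown_tables_alt
  rw [foldA_eq_foldS]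
  rw [foldS_none _ _ _ (fun s hs => by simpa using (List.mem_filter.mp hs).2)]
  simp
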